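-- pv_equiv track=rewrite | github.com/Farsyte/live-coding | asl/diskdef.py | get_extmsk
-- ===== SOURCE A (Python) =====
-- def get_extmsk(bls,dks,k16):
--     blkval = bls // 1024		# kilobytes per block
--     extmsk = 0			# fill from right
--     for i in range(16):
--         if blkval == 1:
--             break
--         extmsk = (extmsk << 1) | 1
--         blkval = blkval // 2
--     if dks > 256:			# may be double byte allocation
--         extmsk = extmsk >> 1
--     if k16 is not None:		# may be optional [0] in last position")
--         extmsk = k16
--     return extmsk
-- ===== SOURCE B (Python) =====
-- def get_extmsk(bls, dks, k16):
--     blkval = bls // 1024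
--     if blkval >= 1:
--         it = min(16, blkval.bit_length() - 1)
--     else:
--         it = 16
--     extmsk = (1 << it) - 1
--     if dks > 256:
--         extmsk = extmsk >> 1
--     if k16 is not None:
--         extmsk = k16
--     return extmsk
-- ===== Notes on version B (the rewrite author's own statement) =====
-- stated objective: idiomatic
-- what changed: Replaced the 16-iteration bit-by-bit halving loop with a closed form: the number of set bits is min(16, bit_length-1) for positive kilobyte counts (16 otherwise), and the mask is (1 << it) - 1.
import Mathlib
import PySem

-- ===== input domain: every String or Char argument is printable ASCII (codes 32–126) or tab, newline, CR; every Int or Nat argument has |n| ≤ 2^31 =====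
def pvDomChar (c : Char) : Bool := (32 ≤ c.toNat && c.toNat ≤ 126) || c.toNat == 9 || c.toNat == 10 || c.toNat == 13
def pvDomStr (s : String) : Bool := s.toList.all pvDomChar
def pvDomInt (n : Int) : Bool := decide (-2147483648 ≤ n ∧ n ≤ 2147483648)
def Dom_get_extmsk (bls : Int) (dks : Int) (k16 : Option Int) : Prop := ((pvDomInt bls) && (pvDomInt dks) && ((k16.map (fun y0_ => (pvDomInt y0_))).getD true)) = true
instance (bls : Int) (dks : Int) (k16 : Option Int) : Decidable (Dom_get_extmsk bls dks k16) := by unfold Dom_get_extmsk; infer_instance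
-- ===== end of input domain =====

-- B replaces A's 16-step bit-by-bit halving loop with a closed-form mask (1 << min(16, log2)) - 1; objective: idiomatic, same cost.

-- ===== PORT A =====
-- A's `for i in range(16): if blkval == 1: break; …` loop, transliterated as structural
-- recursion on the remaining iteration count; `(extmsk << 1) | 1` is `Int.lor (… <<< 1) 1`
-- (exact for Python ints on these values), `blkval // 2` is PySem.Int.floordiv.
def get_extmsk_loop : Nat → Int → Int → Int
  | 0, extmsk, _ => extmsk
  | n+1, extmsk, blkval =>
    if blkval == 1 then extmsk
    else get_extmsk_loop n (Int.lor (extmsk <<< (1:Int)) 1) (PySem.Int.floordiv blkval 2)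

def get_extmsk (bls : Int) (dks : Int) (k16 : Option Int) : Int :=
  let blkval : Int := PySem.Int.floordiv bls 1024
  let extmsk : Int := get_extmsk_loop 16 0 blkval
  let extmsk : Int := if dks > 256 then extmsk >>> (1:Int) else extmsk
  match k16 with
  | some v => v          -- `if k16 is not None: extmsk = k16`
  | none => extmsk

-- ===== PORT B =====
-- Source B: closed form; Python's `blkval.bit_length() - 1` for blkval ≥ 1 is Nat.log2.
def get_extmsk_alt (bls : Int) (dks : Int) (k16 : Option Int) : Int :=
  let blkval : Int := PySem.Int.floordiv bls 1024
  let it : Nat := if 1 ≤ blkval then min 16 (Nat.log2 blkval.toNat) else 16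
  let extmsk : Int := (1 <<< ((it : Nat) : Int)) - 1
  let extmsk : Int := if dks > 256 then extmsk >>> (1:Int) else extmsk
  match k16 with
  | some v => v
  | none => extmsk

-- ===== PRECONDITION & SPEC =====
def Spec_get_extmsk (bls : Int) (dks : Int) (k16 : Option Int) (out : Int) : Prop := out = get_extmsk_alt bls dks k16
instance (bls : Int) (dks : Int) (k16 : Option Int) (out : Int) : Decidable (Spec_get_extmsk bls dks k16 out) := by unfold Spec_get_extmsk; infer_instance

-- ===== CLAIM (what is proved, stated in full; the proofs are below) =====
def Claim_equal_get_extmsk : Prop := ∀ (bls : Int) (dks : Int) (k16 : Option Int), Dom_get_extmsk bls dks k16 → Spec_get_extmsk bls dks k16 (get_extmsk bls dks k16)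

-- ===== LEMMAS AND PROOFS =====

-- Number of iterations A's loop performs with fuel n starting from blkval = b.
def itCount (n : Nat) (b : Int) : Nat := if 1 ≤ b then min n (Nat.log2 b.toNat) else n

theorem natlor_two_mul (m : Nat) : (2*m) ||| 1 = 2*m+1 := by
  apply Nat.eq_of_testBit_eq; intro i
  rcases i with _|i
  · simp [Nat.testBit_zero]
  · have h2 : (2*m+1)/2 = m := by omega
    have h3 : (2*m)/2 = m := by omega
    simp only [Nat.testBit_or]
    simp [Nat.testBit_add_one, h2, h3]

theorem int_step (m : Int) (h : 0 ≤ m) : Int.lor (m <<< (1:Int)) 1 = 2*m+1 := by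
  obtain ⟨n, rfl⟩ : ∃ k:Nat, m = (k:Int) := ⟨m.toNat, (Int.toNat_of_nonneg h).symm⟩
  rw [show (1:Int) = ((1:Nat):Int) from rfl, Int.shiftLeft_natCast]
  rw [show ((n <<< 1 : Nat):Int).lor ((1:Nat):Int) = (((n <<< 1) ||| 1 : Nat) : Int) from rfl]
  rw [show n <<< 1 = 2*n by simp [Nat.shiftLeft_eq]; ring, natlor_two_mul]
  push_cast; ring

theorem itCount_step (n : Nat) (b : Int) (hb : b ≠ 1) :
    itCount (n+1) b = itCount n (PySem.Int.floordiv b 2) + 1 := by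
  rw [PySem.Int.floordiv_eq_ediv_of_pos (by norm_num : (0:Int) < 2)]
  unfold itCount
  by_cases h1 : 1 ≤ b
  · have hb2 : 2 ≤ b := by omega
    have hq : 1 ≤ b / 2 := (Int.le_ediv_iff_mul_le (by norm_num)).mpr (by omega)
    have htn : (b / 2).toNat = b.toNat / 2 := by omega
    have hlog : Nat.log2 b.toNat = Nat.log2 (b.toNat / 2) + 1 := by
      rw [Nat.log2_def]; simp [show 2 ≤ b.toNat by omega]
    simp only [if_pos h1, if_pos hq, htn, hlog]
    omega
  · have hq : ¬ (1 ≤ b / 2) := by omega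
    simp [h1, hq]

theorem loop_char : ∀ (n : Nat) (b : Int) (k : Nat),
    get_extmsk_loop n (2^k - 1) b = 2^(k + itCount n b) - 1 := by
  intro n
  induction n with
  | zero =>
    intro b k
    unfold get_extmsk_loop itCount
    split_ifs <;> simp
  | succ n ih =>
    intro b k
    unfold get_extmsk_loop
    by_cases hb : b = 1
    · subst hb
      simp [itCount, Nat.log2_def]
    · rw [if_neg (by simpa using hb)]
      have hstep : Int.lor (((2:Int)^k - 1) <<< (1:Int)) 1 = 2^(k+1) - 1 := by
        rw [int_step _ (by have h := one_le_pow₀ (a := (2:Int)) (n := k) (by norm_num); omega)]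
        rw [pow_succ]; ring
      rw [hstep, ih, itCount_step n b hb]
      have hke : k + 1 + itCount n (PySem.Int.floordiv b 2)
          = k + (itCount n (PySem.Int.floordiv b 2) + 1) := by omega
      rw [hke]

theorem get_extmsk_spec_aux (bls dks : Int) (k16 : Option Int) :
    get_extmsk bls dks k16 = get_extmsk_alt bls dks k16 := by
  unfold get_extmsk get_extmsk_alt
  cases k16 with
  | some v => simp
  | none =>
    simp only
    have hpow : (1:Int) <<< ((itCount 16 (PySem.Int.floordiv bls 1024) : Nat) : Int)
        = 2 ^ (itCount 16 (PySem.Int.floordiv bls 1024)) := by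
      rw [Int.shiftLeft_eq_mul_pow]; push_cast; ring
    have hloop : get_extmsk_loop 16 0 (PySem.Int.floordiv bls 1024)
        = 2 ^ (itCount 16 (PySem.Int.floordiv bls 1024)) - 1 := by
      have := loop_char 16 (PySem.Int.floordiv bls 1024) 0
      norm_num at this
      simpa using this
    show (if dks > 256 then get_extmsk_loop 16 0 (PySem.Int.floordiv bls 1024) >>> (1:Int)
            else get_extmsk_loop 16 0 (PySem.Int.floordiv bls 1024))
        = (if dks > 256 then ((1:Int) <<< ((itCount 16 (PySem.Int.floordiv bls 1024) : Nat) : Int) - 1) >>> (1:Int)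
            else (1:Int) <<< ((itCount 16 (PySem.Int.floordiv bls 1024) : Nat) : Int) - 1)
    rw [hloop, hpow]

-- ===== VERDICT (by name: the statement is the Claim_ definition above) =====
theorem get_extmsk_spec : Claim_equal_get_extmsk := by
  intro bls dks k16 _
  unfold Spec_get_extmsk
  exact get_extmsk_spec_aux bls dks k16
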